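-- pv_equiv track=rewrite | github.com/Varanasi-Software-Junction/pythoncodecamp | sortingandsearching/binpartition.py | binPartition
-- ===== SOURCE A (Python) =====
-- def binPartition(a, value):
--     right = len(a) - 1
--     left = 0
--
--     while True:
--         mid = (left + right) // 2
--         if value == a[mid]:
--             return mid - 1
--         if value < a[mid]:
--             right = mid - 1
--         else:
--             left = mid + 1
--         if left > right:
--             if a[mid] < value:
--                 return mid
--             return mid - 1
-- ===== SOURCE B (Python) =====
-- def binPartition(a, value):
--     # Tail recursion testing interval emptiness at entry; the last probe
--     # (mid, x) is carried along so the empty-interval case can decide.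
--     def go(left, right, last_mid, last_x):
--         if left > right:
--             return last_mid if last_x < value else last_mid - 1
--         mid = (left + right) // 2
--         x = a[mid]
--         if x == value:
--             return mid - 1
--         if value < x:
--             return go(left, mid - 1, mid, x)
--         return go(mid + 1, right, mid, x)
--     return go(0, len(a) - 1, 0, a[0])
-- ===== Notes on version B (the rewrite author's own statement) =====
-- stated objective: alternative
-- what changed: A's while-True loop that mutates left/right and tests emptiness after the update is replaced by a tail recursion that tests interval emptiness at entry and carries the last probed (mid, a[mid]) as accumulator state to decide the empty case.
import Mathlib
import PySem

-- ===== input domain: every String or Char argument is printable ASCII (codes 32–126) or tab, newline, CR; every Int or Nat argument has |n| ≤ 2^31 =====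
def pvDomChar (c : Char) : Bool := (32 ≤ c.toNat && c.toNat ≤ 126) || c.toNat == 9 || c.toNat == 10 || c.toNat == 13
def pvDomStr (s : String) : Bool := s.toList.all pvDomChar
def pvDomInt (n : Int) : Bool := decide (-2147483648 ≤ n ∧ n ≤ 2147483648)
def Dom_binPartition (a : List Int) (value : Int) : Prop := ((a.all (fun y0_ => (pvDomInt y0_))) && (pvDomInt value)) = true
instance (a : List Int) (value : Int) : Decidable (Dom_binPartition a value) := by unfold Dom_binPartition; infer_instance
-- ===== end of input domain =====

-- B replaces A's mutating post-test while-True loop by an entry-test tail recursion carrying the last probe (alternative decomposition, not faster). Pre_ excludes only the empty list, on which A raises IndexError.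


-- ===== PORT A =====
-- A's `while True` loop over mutable left/right; fuel only makes the recursion total
-- (a.length + 1 iterations are never exhausted on inputs satisfying Pre_).
def binPartitionLoop (a : List Int) (value : Int) (left right : Int) : Nat → Int
  | 0 => 0
  | fuel + 1 =>
    let mid := PySem.Int.floordiv (left + right) 2
    let am := (PySem.List.pyGet? a mid).getD 0   -- a[mid]; none (IndexError) is excluded by Pre_
    if value == am then mid - 1
    else if value < am then
      let right := mid - 1
      if left > right then (if am < value then mid else mid - 1)
      else binPartitionLoop a value left right fuel
    else
      let left := mid + 1
      if left > right then (if am < value then mid else mid - 1)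
      else binPartitionLoop a value left right fuel

def binPartition (a : List Int) (value : Int) : Int :=
  binPartitionLoop a value 0 ((a.length : Int) - 1) (a.length + 1)

-- ===== PORT B =====
-- B's helper `go`: emptiness tested at entry, last probed (mid, x) carried as state.
def binPartitionGo (a : List Int) (value : Int) (left right lastMid lastX : Int) : Nat → Int
  | 0 => 0
  | fuel + 1 =>
    if left > right then (if lastX < value then lastMid else lastMid - 1)
    else
      let mid := PySem.Int.floordiv (left + right) 2
      let x := (PySem.List.pyGet? a mid).getD 0  -- a[mid]; in range since left ≤ mid ≤ right inside the list
      if x == value then mid - 1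
      else if value < x then binPartitionGo a value left (mid - 1) mid x fuel
      else binPartitionGo a value (mid + 1) right mid x fuel

def binPartition_alt (a : List Int) (value : Int) : Int :=
  binPartitionGo a value 0 ((a.length : Int) - 1) 0 ((PySem.List.pyGet? a 0).getD 0) (a.length + 2)

-- ===== PRECONDITION & SPEC =====
-- Pre_ excludes only the empty list, on which the Python A raises IndexError (a[-1] on []).
def Pre_binPartition (a : List Int) (value : Int) : Prop := a ≠ []
instance (a : List Int) (value : Int) : Decidable (Pre_binPartition a value) := by unfold Pre_binPartition; infer_instance
def pvWitness_binPartition : List Int × Int := ([1, 2, 3], 2)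

def Spec_binPartition (a : List Int) (value : Int) (out : Int) : Prop := out = binPartition_alt a value
instance (a : List Int) (value : Int) (out : Int) : Decidable (Spec_binPartition a value out) := by unfold Spec_binPartition; infer_instance

-- ===== CLAIM (what is proved, stated in full; the proofs are below) =====
def Claim_equal_binPartition : Prop := ∀ (a : List Int) (value : Int), Dom_binPartition a value → Pre_binPartition a value → Spec_binPartition a value (binPartition a value)

-- ===== LEMMAS AND PROOFS =====
-- Core invariant: on a nonempty interval with enough fuel (fuel > right - left), A's loop
-- body agrees with B's entry-test recursion run with one extra unit of fuel, for ANY carried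
-- last-probe state (it is only consulted when the interval is empty).
theorem loop_eq_go (a : List Int) (value : Int) :
    ∀ (fuel : Nat) (left right lastMid lastX : Int), left ≤ right → right - left < fuel →
    binPartitionLoop a value left right fuel = binPartitionGo a value left right lastMid lastX (fuel + 1) := by
  intro fuel
  induction fuel with
  | zero => intro l r _ _ hle hlt; omega
  | succ n ih =>
    intro l r lastMid lastX hle hlt
    rw [binPartitionLoop, binPartitionGo]
    have hnot : ¬ l > r := by omega
    simp only [if_neg hnot]
    set mid := PySem.Int.floordiv (l + r) 2 with hmid
    obtain ⟨hml, hmr⟩ := PySem.Int.floordiv_two_mid_bounds (lo := l) (hi := r) hle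
    rw [← hmid] at hml hmr
    set am := (PySem.List.pyGet? a mid).getD 0 with ham
    by_cases h1 : value = am
    · simp [h1]
    · have h1' : (value == am) = false := by simp [h1]
      have h1'' : (am == value) = false := by simp [Ne.symm h1]
      simp only [h1', h1'', Bool.false_eq_true, if_false]
      by_cases h2 : value < am
      · simp only [if_pos h2]
        by_cases h3 : l > mid - 1
        · rw [binPartitionGo]
          simp [h3]
        · rw [if_neg h3]
          have := ih l (mid - 1) mid am (by omega) (by omega)
          simpa using this
      · simp only [if_neg h2]
        by_cases h3 : mid + 1 > r
        · rw [binPartitionGo]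
          simp [h3]
        · rw [if_neg h3]
          have := ih (mid + 1) r mid am (by omega) (by omega)
          simpa using this

-- ===== VERDICT (by name: the statement is the Claim_ definition above) =====
theorem binPartition_spec : Claim_equal_binPartition := by
  intro a value _ hpre
  unfold Spec_binPartition binPartition binPartition_alt
  have hlen : 0 < a.length := List.length_pos_iff.mpr hpre
  have h := loop_eq_go a value (a.length + 1) 0 ((a.length : Int) - 1) 0
      ((PySem.List.pyGet? a 0).getD 0) (by omega) (by omega)
  simpa using h
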